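-- pv_equiv track=rewrite | github.com/cromatical/TIL | Algorithm-Python/문자열 뒤집기.py | solution
-- ===== SOURCE A (Python) =====
-- def solution(n): # 2개이상 연속으로 사용된 숫자의 덩어리 갯수를 파악해주는 함수
-- 	cnt_0 = 0
-- 	cnt_1 = 0
-- 	i = 0
--
-- 	while i < len(n):
-- 		start = i + 1
-- 		j = 0
-- 		if start < len(n) and n[start] == n[i + j]:
-- 			while n[start] == n[i + j]:
-- 				j += 1
-- 				if i + j >= len(n):
-- 					j -= 1
-- 					break
-- 			if n[start] == '0':
-- 				cnt_0 += 1
-- 			else: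
-- 				cnt_1 += 1
-- 			i += j
-- 		else:
-- 			i += 1
--
-- 	return ('0', cnt_0), ('1', cnt_1)
-- ===== SOURCE B (Python) =====
-- def solution(n):
--     runs = []
--     for ch in n:
--         if runs and runs[-1][0] == ch:
--             runs[-1][1] += 1
--         else:
--             runs.append([ch, 1])
--     cnt_0 = 0
--     cnt_1 = 0
--     for c, L in runs:
--         if L >= 2:
--             if c == '0':
--                 cnt_0 += 1
--             else:
--                 cnt_1 += 1
--     return ('0', cnt_0), ('1', cnt_1)
-- ===== Notes on version B (the rewrite author's own statement) =====
-- stated objective: simpler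
-- what changed: B materializes the maximal runs in one groupby-style pass (extending the last run or opening a new one) and then counts runs of length >= 2 in a separate pass, replacing A's index-jumping outer while loop with a nested inner rescan and boundary-adjusted jump arithmetic.
import Mathlib
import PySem

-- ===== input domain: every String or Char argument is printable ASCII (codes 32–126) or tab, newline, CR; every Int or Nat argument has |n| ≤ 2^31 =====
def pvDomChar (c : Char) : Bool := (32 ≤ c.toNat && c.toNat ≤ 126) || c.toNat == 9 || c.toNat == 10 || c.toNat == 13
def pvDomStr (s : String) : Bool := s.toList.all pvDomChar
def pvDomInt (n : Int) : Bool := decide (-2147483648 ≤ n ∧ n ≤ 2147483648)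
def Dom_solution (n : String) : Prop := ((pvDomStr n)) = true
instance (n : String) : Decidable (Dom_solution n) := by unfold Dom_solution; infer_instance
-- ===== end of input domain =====

-- B materializes the maximal runs first and counts them in a second pass, instead of A's
-- index-jumping nested while loops (objective: simpler). Equivalence is proved for all inputs.

-- ===== PORT A =====
-- inner 'while n[start] == n[i + j]' loop of A (all reads are in range on every reachable call,
-- so getD's default is never consulted)
def innerA (cs : List Char) (i j : Nat) : Nat :=
  if cs.getD (i+1) ' ' = cs.getD (i+j) ' ' then
    (if cs.length ≤ i + (j+1) then (j+1) - 1 else innerA cs i (j+1))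
  else j
termination_by cs.length - (i + j)
decreasing_by omega

-- outer 'while i < len(n)' loop of A; needs innerA ≥ 1 under the guard for termination
theorem innerA_ge (cs : List Char) (i : Nat) : ∀ j, j ≤ innerA cs i j := by
  intro j
  induction hn : cs.length - (i + j) using Nat.strong_induction_on generalizing j with
  | _ N ih =>
    rw [innerA]
    split
    · split
      · omega
      · have := ih (cs.length - (i + (j+1))) (by omega) (j+1) rfl
        omega
    · omega

theorem innerA_pos (cs : List Char) (i : Nat) (h1 : i + 1 < cs.length)
    (h2 : cs.getD (i+1) ' ' = cs.getD i ' ') : 1 ≤ innerA cs i 0 := by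
  rw [innerA]
  have hc : cs.getD (i+1) ' ' = cs.getD (i+0) ' ' := by simpa using h2
  rw [if_pos hc, if_neg (by omega : ¬ cs.length ≤ i + (0+1))]
  exact innerA_ge cs i 1

def loopA (cs : List Char) (c0 c1 : Int) (i : Nat) : Int × Int :=
  if h1 : i < cs.length then
    if h2 : i + 1 < cs.length ∧ cs.getD (i+1) ' ' = cs.getD i ' ' then
      let j := innerA cs i 0
      if cs.getD (i+1) ' ' = '0' then loopA cs (c0+1) c1 (i+j)
      else loopA cs c0 (c1+1) (i+j)
    else loopA cs c0 c1 (i+1)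
  else (c0, c1)
termination_by cs.length - i
decreasing_by
  · have := innerA_pos cs i h2.1 h2.2; omega
  · have := innerA_pos cs i h2.1 h2.2; omega
  · omega

def solution (n : String) : (String × Int) × (String × Int) :=
  let t := loopA n.toList 0 0 0
  (("0", t.1), ("1", t.2))

-- ===== PORT B =====
-- Source B's first for-loop: extend the last materialized run or open a new one
def buildRunsB (acc : List (Char × Nat)) : List Char → List (Char × Nat)
  | [] => acc
  | ch :: rest =>
    match acc.getLast? with
    | some (c, L) =>
      if c = ch then buildRunsB (acc.dropLast ++ [(c, L+1)]) rest
      else buildRunsB (acc ++ [(ch, 1)]) rest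
    | none => buildRunsB [(ch, 1)] rest

-- Source B's counting for-loop over runs
def tallyB (c0 c1 : Int) (rs : List (Char × Nat)) : Int × Int :=
  match rs with
  | [] => (c0, c1)
  | (c, L) :: rest =>
    if 2 ≤ L then
      if c = '0' then tallyB (c0+1) c1 rest else tallyB c0 (c1+1) rest
    else tallyB c0 c1 rest

def solution_alt (n : String) : (String × Int) × (String × Int) :=
  let t := tallyB 0 0 (buildRunsB [] n.toList)
  (("0", t.1), ("1", t.2))

-- ===== PRECONDITION & SPEC =====
def Spec_solution (n : String) (out : (String × Int) × (String × Int)) : Prop := out = solution_alt n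
instance (n : String) (out : (String × Int) × (String × Int)) : Decidable (Spec_solution n out) := by unfold Spec_solution; infer_instance

-- ===== CLAIM (what is proved, stated in full; the proofs are below) =====
def Claim_equal_solution : Prop := ∀ (n : String), Dom_solution n → Spec_solution n (solution n)

-- ===== LEMMAS AND PROOFS =====

-- proof-only characterization of maximal runs (index-based scan)
def runLenB (s : List Char) (c : Char) (k : Nat) : Nat :=
  if k < s.length ∧ s.getD k ' ' = c then runLenB s c (k+1) else k
termination_by s.length - k
decreasing_by omega

theorem runLenB_ge (s : List Char) (c : Char) : ∀ k, k ≤ runLenB s c k := by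
  intro k
  induction hn : s.length - k using Nat.strong_induction_on generalizing k with
  | _ N ih =>
    rw [runLenB]
    split
    · have := ih (s.length - (k+1)) (by omega) (k+1) rfl
      omega
    · omega

def runsB : List Char → List (Char × Nat)
  | [] => []
  | c :: rest => (c, runLenB (c :: rest) c 1) :: runsB ((c :: rest).drop (runLenB (c :: rest) c 1))
termination_by s => s.length
decreasing_by
  have := runLenB_ge (c :: rest) c 1
  simp only [List.length_drop, List.length_cons]
  omega

theorem runLenB_shift (x : Char) (s : List Char) (c : Char) :
    ∀ k, runLenB (x :: s) c (k+1) = runLenB s c k + 1 := by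
  intro k
  induction hn : s.length - k using Nat.strong_induction_on generalizing k with
  | _ N ih =>
    conv_lhs => rw [runLenB]
    conv_rhs => rw [runLenB]
    by_cases h : k < s.length ∧ s.getD k ' ' = c
    · rw [if_pos (show k+1 < (x :: s).length ∧ (x :: s).getD (k+1) ' ' = c from
        ⟨by simp only [List.length_cons]; omega, by rw [List.getD_cons_succ]; exact h.2⟩),
        if_pos h]
      exact ih (s.length - (k+1)) (by omega) (k+1) rfl
    · rw [if_neg (show ¬ (k+1 < (x :: s).length ∧ (x :: s).getD (k+1) ' ' = c) from by
        rw [List.getD_cons_succ]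
        simp only [List.length_cons, not_and] at h ⊢
        intro hl
        exact h (by omega)), if_neg h]

theorem buildRunsB_concat (rs : List (Char × Nat)) (c : Char) (L : Nat) (ch : Char)
    (rest : List Char) :
    buildRunsB (rs ++ [(c, L)]) (ch :: rest)
      = if c = ch then buildRunsB (rs ++ [(c, L+1)]) rest
        else buildRunsB ((rs ++ [(c, L)]) ++ [(ch, 1)]) rest := by
  rw [buildRunsB, List.getLast?_concat]
  simp

theorem buildRunsB_single (c : Char) (L : Nat) (ch : Char) (rest : List Char) :
    buildRunsB [(c, L)] (ch :: rest)
      = if c = ch then buildRunsB [(c, L+1)] rest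
        else buildRunsB ([(c, L)] ++ [(ch, 1)]) rest := by
  have := buildRunsB_concat [] c L ch rest
  simpa using this

theorem buildRuns_append (cs : List Char) : ∀ (rs : List (Char × Nat)) (c : Char) (L : Nat),
    buildRunsB (rs ++ [(c, L)]) cs = rs ++ buildRunsB [(c, L)] cs := by
  induction cs with
  | nil => intro rs c L; simp [buildRunsB]
  | cons ch rest ih =>
    intro rs c L
    rw [buildRunsB_concat, buildRunsB_single]
    by_cases hc : c = ch
    · rw [if_pos hc, if_pos hc, ih rs c (L+1)]
    · rw [if_neg hc, if_neg hc, ih (rs ++ [(c, L)]) ch 1, ih [(c, L)] ch 1,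
        List.append_assoc]

theorem buildRuns_run (cs : List Char) : ∀ (c : Char) (L : Nat),
    buildRunsB [(c, L)] cs
      = (c, L + runLenB cs c 0) :: runsB (cs.drop (runLenB cs c 0)) := by
  induction cs with
  | nil =>
    intro c L
    rw [runLenB, if_neg (by simp)]
    simp [buildRunsB, runsB]
  | cons ch rest ih =>
    intro c L
    rw [buildRunsB_single]
    by_cases hc : c = ch
    · subst hc
      have ht : runLenB (c :: rest) c 0 = runLenB rest c 0 + 1 := by
        rw [runLenB, if_pos ⟨by simp, by rw [List.getD_cons_zero]⟩]
        exact runLenB_shift c rest c 0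
      rw [if_pos rfl, ih c (L+1), ht, List.drop_succ_cons]
      have harith : L + 1 + runLenB rest c 0 = L + (runLenB rest c 0 + 1) := by omega
      rw [harith]
    · have ht : runLenB (ch :: rest) c 0 = 0 := by
        rw [runLenB, if_neg (by
          rw [List.getD_cons_zero]
          exact fun h => hc h.2.symm)]
      rw [if_neg hc, ht, List.drop_zero, buildRuns_append rest [(c, L)] ch 1, ih ch 1,
        runsB, runLenB_shift ch rest ch 0, List.drop_succ_cons]
      simp [Nat.add_comm]

theorem buildRuns_eq (cs : List Char) : buildRunsB [] cs = runsB cs := by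
  cases cs with
  | nil => rw [runsB]; rfl
  | cons ch rest =>
    show buildRunsB [(ch, 1)] rest = _
    rw [buildRuns_run rest ch 1, runsB,
      runLenB_shift ch rest ch 0, List.drop_succ_cons]
    simp [Nat.add_comm]


theorem getD_drop (cs : List Char) (i k : Nat) (d : Char) :
    (cs.drop i).getD k d = cs.getD (i + k) d := by
  simp [List.getD, List.getElem?_drop]

theorem runLenB_le (s : List Char) (c : Char) : ∀ k, k ≤ s.length → runLenB s c k ≤ s.length := by
  intro k
  induction hn : s.length - k using Nat.strong_induction_on generalizing k with
  | _ N ih =>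
    intro hk
    rw [runLenB]
    split
    · exact ih (s.length - (k+1)) (by omega) (k+1) rfl (by omega)
    · exact hk

theorem drop_getD_cons (cs : List Char) (i : Nat) (h : i < cs.length) :
    cs.drop i = cs.getD i ' ' :: cs.drop (i+1) := by
  rw [List.drop_eq_getElem_cons h]
  simp [List.getD, List.getElem?_eq_getElem h]

theorem runsB_nil : runsB [] = [] := by rw [runsB]

theorem tallyB_nil (c0 c1 : Int) : tallyB c0 c1 [] = (c0, c1) := rfl

theorem tallyB_skip (c0 c1 : Int) (c : Char) (L : Nat) (rs : List (Char × Nat))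
    (h : L < 2) : tallyB c0 c1 ((c, L) :: rs) = tallyB c0 c1 rs := by
  rw [tallyB, if_neg (by omega)]

theorem tallyB_zero (c0 c1 : Int) (c : Char) (L : Nat) (rs : List (Char × Nat))
    (h2 : 2 ≤ L) (hc : c = '0') :
    tallyB c0 c1 ((c, L) :: rs) = tallyB (c0+1) c1 rs := by
  rw [tallyB, if_pos h2, if_pos hc]

theorem tallyB_one (c0 c1 : Int) (c : Char) (L : Nat) (rs : List (Char × Nat))
    (h2 : 2 ≤ L) (hc : ¬ c = '0') :
    tallyB c0 c1 ((c, L) :: rs) = tallyB c0 (c1+1) rs := by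
  rw [tallyB, if_pos h2, if_neg hc]

theorem innerA_runLen (cs : List Char) (i : Nat)
    (hg : cs.getD (i+1) ' ' = cs.getD i ' ') :
    ∀ j, i + j < cs.length →
      innerA cs i j =
        (if i + runLenB (cs.drop i) (cs.getD i ' ') j = cs.length
         then runLenB (cs.drop i) (cs.getD i ' ') j - 1
         else runLenB (cs.drop i) (cs.getD i ' ') j) := by
  intro j
  induction hn : cs.length - (i + j) using Nat.strong_induction_on generalizing j with
  | _ N ih =>
    intro hij
    rw [innerA]
    by_cases he : cs.getD (i+j) ' ' = cs.getD i ' '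
    · have hcond : j < (cs.drop i).length ∧ (cs.drop i).getD j ' ' = cs.getD i ' ' := by
        refine ⟨?_, by rw [getD_drop]; exact he⟩
        simp only [List.length_drop]; omega
      have hrl : runLenB (cs.drop i) (cs.getD i ' ') j
          = runLenB (cs.drop i) (cs.getD i ' ') (j+1) := by
        conv_lhs => rw [runLenB]
        rw [if_pos hcond]
      rw [if_pos (hg.trans he.symm), hrl]
      by_cases hb : cs.length ≤ i + (j+1)
      · rw [if_pos hb]
        have hstop : runLenB (cs.drop i) (cs.getD i ' ') (j+1) = j+1 := by
          rw [runLenB, if_neg]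
          simp only [List.length_drop, not_and]
          omega
        rw [hstop, if_pos (by omega)]
      · rw [if_neg hb]
        exact ih (cs.length - (i + (j+1))) (by omega) (j+1) rfl (by omega)
    · have hne : ¬ (cs.getD (i+1) ' ' = cs.getD (i+j) ' ') := by
        rw [hg]; exact fun h => he h.symm
      have hrl : runLenB (cs.drop i) (cs.getD i ' ') j = j := by
        rw [runLenB, if_neg]
        rw [getD_drop]
        exact fun h => he h.2
      rw [if_neg hne, hrl, if_neg (by omega)]

theorem loopA_tally (cs : List Char) :
    ∀ N i c0 c1, cs.length - i ≤ N →
      loopA cs c0 c1 i = tallyB c0 c1 (runsB (cs.drop i)) := by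
  intro N
  induction N with
  | zero =>
    intro i c0 c1 hN
    rw [loopA, dif_neg (by omega), List.drop_eq_nil_of_le (by omega), runsB_nil, tallyB_nil]
  | succ N ih =>
    intro i c0 c1 hN
    rw [loopA]
    by_cases h1 : i < cs.length
    · rw [dif_pos h1]
      have hdrop := drop_getD_cons cs i h1
      set K := runLenB (cs.drop i) (cs.getD i ' ') 1 with hK
      have hKval : runLenB (cs.getD i ' ' :: cs.drop (i+1)) (cs.getD i ' ') 1 = K := by
        rw [hK, hdrop]
      have hK1 : 1 ≤ K := hK ▸ runLenB_ge _ _ 1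
      have hKle : K ≤ cs.length - i := by
        have := runLenB_le (cs.drop i) (cs.getD i ' ') 1
          (by simp only [List.length_drop]; omega)
        simpa only [List.length_drop, ← hK] using this
      have hruns : runsB (cs.drop i) = (cs.getD i ' ', K) :: runsB (cs.drop (i+K)) := by
        rw [hdrop, runsB, hKval, ← hdrop, List.drop_drop]
      by_cases h2 : i + 1 < cs.length ∧ cs.getD (i+1) ' ' = cs.getD i ' '
      · rw [dif_pos h2]
        have hK2 : 2 ≤ K := by
          rw [hK, runLenB, if_pos ⟨by simp only [List.length_drop]; omega,
            by rw [getD_drop]; exact h2.2⟩]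
          exact runLenB_ge _ _ 2
        have hj : innerA cs i 0 = if i + K = cs.length then K - 1 else K := by
          rw [innerA, if_pos (by simpa using h2.2),
            if_neg (by omega : ¬ cs.length ≤ i + (0+1))]
          have h' := innerA_runLen cs i h2.2 1 (by omega)
          rw [h', ← hK]
        by_cases hend : i + K = cs.length
        · rw [hj, if_pos hend, hruns, List.drop_eq_nil_of_le (by omega), runsB_nil]
          have hone : runsB (cs.drop (i+(K-1))) = [(cs.getD (i+(K-1)) ' ', 1)] := by
            have h1' : i + (K-1) < cs.length := by omega
            have hd1 : cs.drop (i+(K-1)) = [cs.getD (i+(K-1)) ' '] := by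
              rw [drop_getD_cons cs _ h1', List.drop_eq_nil_of_le (by omega)]
            rw [hd1, runsB, runLenB, if_neg (by simp),
              show List.drop 1 [cs.getD (i+(K-1)) ' '] = [] from rfl, runsB_nil]
          by_cases hc0 : cs.getD (i+1) ' ' = '0'
          · rw [if_pos hc0, ih (i+(K-1)) (c0+1) c1 (by omega), hone,
              tallyB_skip _ _ _ _ _ (by omega),
              tallyB_zero _ _ _ _ _ hK2 (h2.2 ▸ hc0)]
          · rw [if_neg hc0, ih (i+(K-1)) c0 (c1+1) (by omega), hone,
              tallyB_skip _ _ _ _ _ (by omega),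
              tallyB_one _ _ _ _ _ hK2 (fun h => hc0 (h2.2.trans h))]
        · rw [hj, if_neg hend, hruns]
          by_cases hc0 : cs.getD (i+1) ' ' = '0'
          · rw [if_pos hc0, ih (i+K) (c0+1) c1 (by omega),
              tallyB_zero _ _ _ _ _ hK2 (h2.2 ▸ hc0)]
          · rw [if_neg hc0, ih (i+K) c0 (c1+1) (by omega),
              tallyB_one _ _ _ _ _ hK2 (fun h => hc0 (h2.2.trans h))]
      · rw [dif_neg h2]
        have hKone : K = 1 := by
          rw [hK, runLenB, if_neg]
          rw [getD_drop]
          simp only [List.length_drop, not_and]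
          intro hlen heq
          exact h2 ⟨by omega, heq⟩
        rw [ih (i+1) c0 c1 (by omega), hruns, hKone,
          tallyB_skip _ _ _ _ _ (by omega)]
    · rw [dif_neg h1, List.drop_eq_nil_of_le (by omega), runsB_nil, tallyB_nil]

-- ===== VERDICT (by name: the statement is the Claim_ definition above) =====
theorem solution_spec : Claim_equal_solution := by
  intro n _
  unfold Spec_solution solution solution_alt
  have := loopA_tally n.toList n.toList.length 0 0 0 (by omega)
  simp only [List.drop_zero] at this
  rw [buildRuns_eq, this]
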